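-- pv_equiv track=rewrite | github.com/nhimatsinghani/DSA | problem-solving/dp/max-index-can-be-reached.py | maxIndex_mathematical_approach
-- ===== SOURCE A (Python) =====
-- def maxIndex_mathematical_approach(steps, badIndex):
--     """
--     Mathematical/Greedy approach - more efficient
--     Time: O(steps), Space: O(1)
--
--     Key insight: We want to maximize the final position, so we should
--     generally try to move forward when possible, but we need to be careful
--     about the badIndex.
--     """
--     current_index = 0
--     jump_value = 1
--
--     for step in range(steps):
--         # Check if we can move forward without hitting badIndex
--         next_index = current_index + jump_value
--
--         if next_index != badIndex:
--             # Move forward if it doesn't hit badIndex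
--             current_index = next_index
--
--         # Always increment jump value regardless of whether we moved
--         jump_value += 1
--
--     return current_index
-- ===== SOURCE B (Python) =====
-- def maxIndex_mathematical_approach(steps, badIndex):
--     # Closed form: the greedy walk lands on triangular numbers; at most one jump
--     # (the k-th, if badIndex is the k-th triangular number with k <= steps) is skipped,
--     # in which case every later position -- including the final one -- is lower by k.
--     # The skipped k is located by binary search: O(log steps) instead of O(steps).
--     if steps <= 0:
--         return 0
--     total = steps * (steps + 1) // 2
--     lo, hi = 1, steps
--     while lo <= hi:
--         mid = (lo + hi) // 2
--         t = mid * (mid + 1) // 2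
--         if t == badIndex:
--             return total - mid
--         if t < badIndex:
--             lo = mid + 1
--         else:
--             hi = mid - 1
--     return total
-- ===== Notes on version B (the rewrite author's own statement) =====
-- stated objective: faster
-- what changed: Replaces the O(steps) greedy simulation by a closed form: the walk visits triangular numbers and skips at most one jump (the k-th, iff badIndex is the k-th triangular number with k <= steps), so B returns steps*(steps+1)//2 minus that k, locating k by binary search.
import Mathlib
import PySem

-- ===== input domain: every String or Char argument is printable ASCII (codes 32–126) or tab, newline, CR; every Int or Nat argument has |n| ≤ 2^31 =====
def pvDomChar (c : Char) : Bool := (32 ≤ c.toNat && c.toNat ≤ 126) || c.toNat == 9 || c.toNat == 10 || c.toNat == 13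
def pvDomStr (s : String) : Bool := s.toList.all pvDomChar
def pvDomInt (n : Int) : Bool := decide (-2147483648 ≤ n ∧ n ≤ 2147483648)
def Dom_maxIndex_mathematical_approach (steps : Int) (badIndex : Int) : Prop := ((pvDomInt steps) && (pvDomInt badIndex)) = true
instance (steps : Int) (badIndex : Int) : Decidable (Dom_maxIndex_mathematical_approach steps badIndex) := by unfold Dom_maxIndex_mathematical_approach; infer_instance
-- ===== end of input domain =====

-- B replaces the O(steps) greedy simulation by a closed form: the walk lands on
-- triangular numbers and skips at most one jump (the k-th, if badIndex is the k-th
-- triangular number with k ≤ steps), located by binary search.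

-- ===== PORT A =====
def maxIndex_mathematical_approach (steps : Int) (badIndex : Int) : Int :=
  -- for step in range(steps): state = (current_index, jump_value)
  ((PySem.List.pyRange 0 steps 1).foldl
    (fun (st : Int × Int) _ =>
      let next := st.1 + st.2
      ((if next ≠ badIndex then next else st.1), st.2 + 1))
    (0, 1)).1

-- ===== PORT B =====
-- the while-loop of Source B with early return, as a recursion on the shrinking
-- interval; the Nat fuel (the interval length) is only a totality guard
def pvBSearchGo (badIndex : Int) : Nat → Int → Int → Option Int
  | 0, _, _ => none
  | fuel + 1, lo, hi =>
    if lo ≤ hi then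
      let mid := PySem.Int.floordiv (lo + hi) 2
      let t := PySem.Int.floordiv (mid * (mid + 1)) 2
      if t = badIndex then some mid
      else if t < badIndex then pvBSearchGo badIndex fuel (mid + 1) hi
      else pvBSearchGo badIndex fuel lo (mid - 1)
    else none

def pvBSearch (badIndex : Int) (lo hi : Int) : Option Int :=
  pvBSearchGo badIndex (hi + 1 - lo).toNat lo hi

def maxIndex_mathematical_approach_alt (steps : Int) (badIndex : Int) : Int :=
  if steps ≤ 0 then 0
  else
    let total := PySem.Int.floordiv (steps * (steps + 1)) 2
    match pvBSearch badIndex 1 steps with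
    | some k => total - k
    | none => total

-- ===== PRECONDITION & SPEC =====
def Spec_maxIndex_mathematical_approach (steps : Int) (badIndex : Int) (out : Int) : Prop := out = maxIndex_mathematical_approach_alt steps badIndex
instance (steps : Int) (badIndex : Int) (out : Int) : Decidable (Spec_maxIndex_mathematical_approach steps badIndex out) := by unfold Spec_maxIndex_mathematical_approach; infer_instance

-- ===== CLAIM (what is proved, stated in full; the proofs are below) =====
def Claim_equal_maxIndex_mathematical_approach : Prop := ∀ (steps : Int) (badIndex : Int), Dom_maxIndex_mathematical_approach steps badIndex → Spec_maxIndex_mathematical_approach steps badIndex (maxIndex_mathematical_approach steps badIndex)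

-- ===== LEMMAS AND PROOFS =====

-- triangular numbers, recursively (the positions A's walk visits when nothing is skipped)
def pvTri : Nat → Int
  | 0 => 0
  | n + 1 => pvTri n + (n + 1)

lemma pvTri_mono {a b : Nat} (h : a ≤ b) : pvTri a ≤ pvTri b := by
  induction b with
  | zero =>
    have : a = 0 := Nat.le_zero.mp h
    subst this; exact le_refl _
  | succ b ih =>
    rcases Nat.lt_or_ge a (b + 1) with h' | h'
    · have := ih (by omega)
      simp only [pvTri]; omega
    · have : a = b + 1 := by omega
      subst this; exact le_refl _

lemma pvTri_strict_mono {a b : Nat} (h : a < b) : pvTri a < pvTri b := by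
  have h1 : pvTri (a + 1) ≤ pvTri b := pvTri_mono h
  simp only [pvTri] at h1; omega

lemma pvTri_two_mul (n : Nat) : 2 * pvTri n = (n : Int) * (n + 1) := by
  induction n with
  | zero => simp [pvTri]
  | succ n ih => simp only [pvTri]; push_cast; push_cast at ih; ring_nf; ring_nf at ih; omega

lemma pvTri_floordiv (n : Nat) :
    PySem.Int.floordiv ((n : Int) * ((n : Int) + 1)) 2 = pvTri n := by
  rw [PySem.Int.floordiv_eq_ediv_of_pos (by omega)]
  have := pvTri_two_mul n
  omega

-- the skip index: K n bad = k if the walk of n steps skipped jump k (i.e. bad = pvTri k,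
-- 1 ≤ k ≤ n), else 0
def pvK (bad : Int) : Nat → Nat
  | 0 => 0
  | n + 1 => if pvK bad n ≠ 0 then pvK bad n else if pvTri (n + 1) = bad then n + 1 else 0

lemma pvK_spec (bad : Int) (n : Nat) :
    pvK bad n = 0 ∨ (1 ≤ pvK bad n ∧ pvK bad n ≤ n ∧ pvTri (pvK bad n) = bad) := by
  induction n with
  | zero => left; rfl
  | succ n ih =>
    simp only [pvK]
    split_ifs with h1 h2
    · rcases ih with h | h
      · omega
      · right; exact ⟨h.1, by omega, h.2.2⟩
    · right; exact ⟨by omega, le_refl _, h2⟩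
    · left; rfl

lemma pvK_unique (bad : Int) {n k : Nat} (h1 : 1 ≤ k) (h2 : k ≤ n)
    (h3 : pvTri k = bad) : pvK bad n = k := by
  induction n with
  | zero => omega
  | succ n ih =>
    rcases Nat.lt_or_ge k (n + 1) with h' | h'
    · have hk : pvK bad n = k := ih (by omega)
      simp only [pvK, hk]
      split_ifs with hz hb
      · rfl
      all_goals omega
    · have hk : k = n + 1 := by omega
      subst hk
      have hz : pvK bad n = 0 := by
        rcases pvK_spec bad n with h | h
        · exact h
        · exfalso
          have : pvTri (pvK bad n) < pvTri (n + 1) := pvTri_strict_mono (by omega)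
          rw [h.2.2, h3] at this; omega
      simp [pvK, hz, h3]

-- a fold that ignores the list elements only iterates
lemma foldl_const_iterate {α β : Type} (g : α → α) (l : List β) (i : α) :
    l.foldl (fun s _ => g s) i = g^[l.length] i := by
  induction l generalizing i with
  | nil => rfl
  | cons x xs ih => simp [List.foldl, ih, Function.iterate_succ_apply]

-- the invariant of A's loop
lemma pvA_invariant (bad : Int) (n : Nat) :
    (fun (st : Int × Int) =>
      let next := st.1 + st.2
      ((if next ≠ bad then next else st.1), st.2 + 1))^[n] ((0 : Int), (1 : Int))
      = (pvTri n - pvK bad n, (n : Int) + 1) := by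
  induction n with
  | zero => simp [pvTri, pvK]
  | succ n ih =>
    rw [Function.iterate_succ_apply', ih]
    dsimp only
    have htr : pvTri (n + 1) = pvTri n + ((n : Int) + 1) := by
      simp only [pvTri]
    rcases pvK_spec bad n with hz | hk
    · by_cases hb : pvTri n - ((pvK bad n : Nat) : Int) + ((n : Int) + 1) = bad
      · have hb' : pvTri (n + 1) = bad := by rw [htr]; rw [hz] at hb; push_cast at hb; omega
        have hK : pvK bad (n + 1) = n + 1 := by simp [pvK, hz, hb']
        rw [if_neg (not_ne_iff.mpr hb), hK, hz]
        simp only [Prod.mk.injEq]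
        push_cast
        constructor <;> omega
      · have hb' : ¬ pvTri (n + 1) = bad := by rw [htr]; rw [hz] at hb; push_cast at hb; omega
        have hK : pvK bad (n + 1) = 0 := by simp [pvK, hz, hb']
        rw [if_pos hb, hK, hz]
        simp only [Prod.mk.injEq]
        push_cast
        constructor <;> omega
    · -- a skip already happened: the shifted position never hits bad again
      have hK : pvK bad (n + 1) = pvK bad n := by
        have hnz : pvK bad n ≠ 0 := by omega
        simp [pvK, hnz]
      have hmono : pvTri (pvK bad n + 1) ≤ pvTri (n + 1) :=
        pvTri_mono (Nat.succ_le_succ hk.2.1)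
      have hstep : pvTri (pvK bad n + 1) = pvTri (pvK bad n) + ((pvK bad n : Int) + 1) := by
        simp only [pvTri]
      have hb' := hk.2.2
      have hne : pvTri n - ((pvK bad n : Nat) : Int) + ((n : Int) + 1) ≠ bad := by omega
      rw [if_pos hne, hK]
      simp only [Prod.mk.injEq]
      constructor
      · omega
      · push_cast; ring

lemma pvA_closed (steps bad : Int) :
    maxIndex_mathematical_approach steps bad
      = pvTri steps.toNat - pvK bad steps.toNat := by
  unfold maxIndex_mathematical_approach
  rw [foldl_const_iterate, PySem.List.length_pyRange_one]
  have : (steps - 0).toNat = steps.toNat := by omega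
  rw [this, pvA_invariant]

-- binary-search correctness, by induction on the fuel
lemma pvBSearchGo_some (bad : Int) (N : Nat) :
    ∀ lo hi k : Int, (hi + 1 - lo).toNat ≤ N → 1 ≤ lo →
      pvBSearchGo bad N lo hi = some k →
      lo ≤ k ∧ k ≤ hi ∧ PySem.Int.floordiv (k * (k + 1)) 2 = bad := by
  induction N with
  | zero =>
    intro lo hi k hN hlo h
    exact absurd h (by simp [pvBSearchGo])
  | succ N ih =>
    intro lo hi k hN hlo h
    rw [pvBSearchGo] at h
    by_cases hle : lo ≤ hi
    · rw [if_pos hle] at h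
      have hm := PySem.Int.floordiv_two_mid_bounds hle
      dsimp only at h
      split_ifs at h with h1 h2
      · cases h; exact ⟨hm.1, hm.2, h1⟩
      · have := ih _ _ _ (by omega) (by omega) h
        exact ⟨by omega, this.2.1, this.2.2⟩
      · have := ih _ _ _ (by omega) hlo h
        exact ⟨this.1, by omega, this.2.2⟩
    · rw [if_neg hle] at h
      exact absurd h (by simp)

lemma pvTriI_mono {a b : Int} (h0 : 0 ≤ a) (h : a ≤ b) :
    PySem.Int.floordiv (a * (a + 1)) 2 ≤ PySem.Int.floordiv (b * (b + 1)) 2 := by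
  rw [PySem.Int.floordiv_eq_ediv_of_pos (by omega),
      PySem.Int.floordiv_eq_ediv_of_pos (by omega)]
  have : a * (a + 1) ≤ b * (b + 1) := by nlinarith
  omega

lemma pvBSearchGo_none (bad : Int) (N : Nat) :
    ∀ lo hi : Int, (hi + 1 - lo).toNat ≤ N → 1 ≤ lo →
      pvBSearchGo bad N lo hi = none →
      ∀ m : Int, lo ≤ m → m ≤ hi → PySem.Int.floordiv (m * (m + 1)) 2 ≠ bad := by
  induction N with
  | zero =>
    intro lo hi hN hlo h m h1 h2
    omega
  | succ N ih =>
    intro lo hi hN hlo h m h1 h2 hc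
    rw [pvBSearchGo] at h
    by_cases hle : lo ≤ hi
    · rw [if_pos hle] at h
      have hm := PySem.Int.floordiv_two_mid_bounds hle
      dsimp only at h
      by_cases h1' : PySem.Int.floordiv (PySem.Int.floordiv (lo + hi) 2 * (PySem.Int.floordiv (lo + hi) 2 + 1)) 2 = bad
      · rw [if_pos h1'] at h
        exact absurd h (by simp)
      · rw [if_neg h1'] at h
        by_cases h2' : PySem.Int.floordiv (PySem.Int.floordiv (lo + hi) 2 * (PySem.Int.floordiv (lo + hi) 2 + 1)) 2 < bad
        · rw [if_pos h2'] at h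
          rcases le_or_gt m (PySem.Int.floordiv (lo + hi) 2) with hm' | hm'
          · have := pvTriI_mono (a := m) (b := PySem.Int.floordiv (lo + hi) 2) (by omega) hm'
            omega
          · exact ih (PySem.Int.floordiv (lo + hi) 2 + 1) hi (by omega) (by omega) h m (by omega) h2 hc
        · rw [if_neg h2'] at h
          rcases le_or_gt (PySem.Int.floordiv (lo + hi) 2) m with hm' | hm'
          · have := pvTriI_mono (a := PySem.Int.floordiv (lo + hi) 2) (b := m) (by omega) hm'
            omega
          · exact ih lo (PySem.Int.floordiv (lo + hi) 2 - 1) (by omega) hlo h m h1 (by omega) hc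
    · omega

-- ===== VERDICT (by name: the statement is the Claim_ definition above) =====
theorem maxIndex_mathematical_approach_spec : Claim_equal_maxIndex_mathematical_approach := by
  intro steps bad _
  unfold Spec_maxIndex_mathematical_approach
  rw [pvA_closed]
  unfold maxIndex_mathematical_approach_alt pvBSearch
  by_cases hs : steps ≤ 0
  · rw [if_pos hs]
    have h0 : steps.toNat = 0 := by omega
    rw [h0]; simp [pvTri, pvK]
  · rw [if_neg hs]
    have hcast : ((steps.toNat : Int)) = steps := by omega
    cases hsearch : pvBSearchGo bad (steps + 1 - 1).toNat 1 steps with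
    | some k =>
      have hk := pvBSearchGo_some bad (steps + 1 - 1).toNat 1 steps k (by omega) (le_refl 1) hsearch
      have hkt : ((k.toNat : Int)) = k := by omega
      have htk : pvTri k.toNat = bad := by
        have hb := hk.2.2
        rw [← hkt, pvTri_floordiv] at hb
        exact hb
      have hK : pvK bad steps.toNat = k.toNat := by
        apply pvK_unique bad (by omega) (by omega) htk
      rw [hK]
      have htot : PySem.Int.floordiv (steps * (steps + 1)) 2 = pvTri steps.toNat := by
        conv_lhs => rw [← hcast]
        rw [pvTri_floordiv]
      simp only [htot]
      omega
    | none =>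
      have hn := pvBSearchGo_none bad (steps + 1 - 1).toNat 1 steps (by omega) (le_refl 1) hsearch
      have hK : pvK bad steps.toNat = 0 := by
        rcases pvK_spec bad steps.toNat with h | h
        · exact h
        · exfalso
          have hk := hn (pvK bad steps.toNat) (by omega) (by omega)
          apply hk
          rw [pvTri_floordiv]
          exact h.2.2
      rw [hK]
      have htot : PySem.Int.floordiv (steps * (steps + 1)) 2 = pvTri steps.toNat := by
        conv_lhs => rw [← hcast]
        rw [pvTri_floordiv]
      simp only [htot]
      omega
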